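-- pv_equiv track=rewrite | github.com/pedrotrasfereti/trybe-is-not-google | src/analyze_log.py | get_never_ordered_by_customer
-- ===== SOURCE A (Python) =====
-- def get_never_ordered_by_customer(data, customer):
--     orders = set()
--     orders_by_customer = set()
--
--     for row in data:
--         curr_customer = row["cliente"]
--         curr_order = row["pedido"]
--
--         orders.add(curr_order)
--
--         if curr_customer == customer:
--             orders_by_customer.add(curr_order)
--
--     never_ordered = orders.difference(orders_by_customer)
--
--     return never_ordered
-- ===== SOURCE B (Python) =====
-- def get_never_ordered_by_customer(data, customer):
--     index = {}
--     for row in data: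
--         index.setdefault(row["pedido"], set()).add(row["cliente"])
--     return {order for order, customers in index.items() if customer not in customers}
-- ===== Notes on version B (the rewrite author's own statement) =====
-- stated objective: alternative
-- what changed: B builds a single dict indexing each order to the set of customers who placed it, then filters the index's items, instead of A's two flat disjoint order sets combined with a set difference.
import Mathlib
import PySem

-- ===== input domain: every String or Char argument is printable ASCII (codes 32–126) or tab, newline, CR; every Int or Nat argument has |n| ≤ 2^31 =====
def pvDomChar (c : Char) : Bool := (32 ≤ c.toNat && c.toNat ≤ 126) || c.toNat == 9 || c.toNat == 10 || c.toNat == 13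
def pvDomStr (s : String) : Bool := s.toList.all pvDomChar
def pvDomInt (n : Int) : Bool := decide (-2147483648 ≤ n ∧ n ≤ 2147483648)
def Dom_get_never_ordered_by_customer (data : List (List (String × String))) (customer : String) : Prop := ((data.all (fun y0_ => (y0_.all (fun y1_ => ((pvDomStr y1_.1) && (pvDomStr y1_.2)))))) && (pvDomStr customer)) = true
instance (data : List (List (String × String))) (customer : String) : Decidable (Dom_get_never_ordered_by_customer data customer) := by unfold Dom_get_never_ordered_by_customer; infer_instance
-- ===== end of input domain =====

-- B replaces A's two flat disjoint order sets + set difference by one order→customers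
-- dict built in a single pass, filtered over its items (objective: alternative).

-- ===== PORT A =====
-- loop body: adds the order to `orders`, and to `orders_by_customer` when the row's customer matches
def pvStepA (customer : String) (st : PySem.Set String × PySem.Set String)
    (row : List (String × String)) : PySem.Set String × PySem.Set String :=
  let curr_customer := (PySem.Dict.mk row).getD "cliente" ""
  let curr_order := (PySem.Dict.mk row).getD "pedido" ""
  let orders := PySem.Set.add st.1 curr_order
  let obc := if curr_customer == customer then PySem.Set.add st.2 curr_order else st.2
  (orders, obc)

def get_never_ordered_by_customer (data : List (List (String × String))) (customer : String) : List String :=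
  let p := data.foldl (pvStepA customer) (PySem.Set.empty, PySem.Set.empty)
  PySem.Set.diff p.1 p.2

-- ===== PORT B =====
-- loop body: index.setdefault(row["pedido"], set()).add(row["cliente"])
def pvStepB (d : PySem.Dict String (PySem.Set String)) (row : List (String × String)) :
    PySem.Dict String (PySem.Set String) :=
  d.modify ((PySem.Dict.mk row).getD "pedido" "") PySem.Set.empty
    (fun s => PySem.Set.add s ((PySem.Dict.mk row).getD "cliente" ""))

def get_never_ordered_by_customer_alt (data : List (List (String × String))) (customer : String) : List String :=
  let index := data.foldl pvStepB PySem.Dict.empty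
  PySem.Set.ofList
    ((index.items.filter (fun p => !(PySem.Set.contains p.2 customer))).map (·.1))

-- ===== PRECONDITION & SPEC =====
-- Pre_ excludes exactly the rows missing key "cliente" or "pedido", on which Python A raises KeyError.
def Pre_get_never_ordered_by_customer (data : List (List (String × String))) (customer : String) : Prop :=
  ∀ row ∈ data, (PySem.Dict.mk row).contains "cliente" = true ∧ (PySem.Dict.mk row).contains "pedido" = true
instance (data : List (List (String × String))) (customer : String) : Decidable (Pre_get_never_ordered_by_customer data customer) := by unfold Pre_get_never_ordered_by_customer; infer_instance

def pvWitness_get_never_ordered_by_customer : (List (List (String × String))) × String :=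
  ([[("cliente", "ana"), ("pedido", "p1")], [("cliente", "bob"), ("pedido", "p2")]], "ana")

def Spec_get_never_ordered_by_customer (data : List (List (String × String))) (customer : String) (out : List String) : Prop := out = get_never_ordered_by_customer_alt data customer
instance (data : List (List (String × String))) (customer : String) (out : List String) : Decidable (Spec_get_never_ordered_by_customer data customer out) := by unfold Spec_get_never_ordered_by_customer; infer_instance

-- ===== CLAIM (what is proved, stated in full; the proofs are below) =====
def Claim_equal_get_never_ordered_by_customer : Prop := ∀ (data : List (List (String × String))) (customer : String), Dom_get_never_ordered_by_customer data customer → Pre_get_never_ordered_by_customer data customer → Spec_get_never_ordered_by_customer data customer (get_never_ordered_by_customer data customer)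

-- ===== LEMMAS AND PROOFS =====

-- invariant: A's `orders` set is exactly B's key list, keys stay Nodup, and an order is in A's
-- `orders_by_customer` exactly when B's customer set at that order contains `customer`
lemma pv_inv (customer : String) (data : List (List (String × String)))
    (st : PySem.Set String × PySem.Set String) (d : PySem.Dict String (PySem.Set String))
    (h1 : st.1 = d.keys) (hnd : d.keys.Nodup)
    (h2 : ∀ o, o ∈ st.2 ↔ customer ∈ d.getD o PySem.Set.empty) :
    (data.foldl (pvStepA customer) st).1 = (data.foldl pvStepB d).keys ∧
    (data.foldl pvStepB d).keys.Nodup ∧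
    ∀ o, o ∈ (data.foldl (pvStepA customer) st).2 ↔
      customer ∈ (data.foldl pvStepB d).getD o PySem.Set.empty := by
  induction data generalizing st d with
  | nil => exact ⟨h1, hnd, h2⟩
  | cons row rest ih =>
    simp only [List.foldl_cons]
    set c := (PySem.Dict.mk row).getD "cliente" "" with hc
    set o := (PySem.Dict.mk row).getD "pedido" "" with ho
    have hkeys : (pvStepB d row).keys = PySem.Set.add st.1 o := by
      rw [pvStepB, PySem.Dict.keys_modify, ← ho]
      by_cases hmem : o ∈ d.keys
      · rw [PySem.Dict.keys_insert_of_contains _ _ ((PySem.Dict.contains_iff_mem_keys d o).2 hmem)]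
        rw [h1, PySem.Set.add_of_mem hmem]
      · rw [PySem.Dict.keys_insert_of_not_contains _ _
          (by simpa using (fun h => hmem ((PySem.Dict.contains_iff_mem_keys d o).1 h)))]
        rw [h1, PySem.Set.add_of_not_mem hmem]
    apply ih
    · simp only [pvStepA, hkeys, ← hc, ← ho]
    · rw [hkeys, h1]
      exact PySem.Set.nodup_add _ _ hnd
    · intro o'
      have hget : (pvStepB d row).getD o' PySem.Set.empty =
          if o' = o then PySem.Set.add (d.getD o PySem.Set.empty) c else d.getD o' PySem.Set.empty := by
        rw [pvStepB, ← hc, ← ho, PySem.Dict.getD_modify]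
      simp only [pvStepA, ← hc, ← ho, hget]
      by_cases hcc : c = customer
      · by_cases ho' : o' = o
        · subst ho'; subst hcc
          simp [PySem.Set.mem_add]
        · simp [hcc, ho', PySem.Set.mem_add, h2 o']
      · have hne : ¬ customer = c := fun h => hcc h.symm
        by_cases ho' : o' = o
        · subst ho'
          simp [beq_eq_false_iff_ne.2 hcc, PySem.Set.mem_add, hne, h2 o]
        · simp [beq_eq_false_iff_ne.2 hcc, ho', h2 o']

-- the filtered items of the final dict are exactly A's set difference
lemma pv_final (customer : String) (d : PySem.Dict String (PySem.Set String))
    (s t : PySem.Set String) (h1 : s = d.keys) (hnd : d.keys.Nodup)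
    (h2 : ∀ o, o ∈ t ↔ customer ∈ d.getD o PySem.Set.empty) :
    PySem.Set.diff s t =
      PySem.Set.ofList ((d.items.filter (fun p => !(PySem.Set.contains p.2 customer))).map (·.1)) := by
  rw [PySem.Dict.items_eq_map_keys d hnd PySem.Set.empty, List.filter_map, List.map_map]
  have hmap : ((fun p : String × PySem.Set String => p.1) ∘ fun k => (k, d.getD k PySem.Set.empty)) = id := rfl
  rw [hmap, List.map_id]
  have hfil : (List.filter ((fun p : String × PySem.Set String => !(PySem.Set.contains p.2 customer)) ∘
      fun k => (k, d.getD k PySem.Set.empty)) d.keys) =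
      List.filter (fun k => !(PySem.Set.contains t k)) d.keys := by
    apply List.filter_congr
    intro k _
    simp [Function.comp, PySem.Set.contains_eq_listContains, h2 k]
  rw [hfil, PySem.Set.ofList_eq_self_of_nodup _ (hnd.filter _), PySem.Set.diff, h1]

-- ===== VERDICT (by name: the statement is the Claim_ definition above) =====
theorem get_never_ordered_by_customer_spec : Claim_equal_get_never_ordered_by_customer := by
  intro data customer _ _
  unfold Spec_get_never_ordered_by_customer get_never_ordered_by_customer get_never_ordered_by_customer_alt
  obtain ⟨h1, hnd, h2⟩ := pv_inv customer data (PySem.Set.empty, PySem.Set.empty) PySem.Dict.empty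
    rfl (by simp [PySem.Dict.empty, PySem.Dict.keys])
    (by intro o; simp [PySem.Set.empty, PySem.Dict.getD_empty])
  exact pv_final customer _ _ _ h1 hnd h2
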